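-- pv_equiv track=rewrite | github.com/tosingithub/tdesk | ufuncs.py | pad_seq_bi
-- ===== SOURCE A (Python) =====
-- def pad_seq_bi(sequence, tag2idx, max_len, seq_type='tok_ids'):
--     padded_seq = []
--     if seq_type == 'tok_ids':
--         padded_seq.extend([0 for i in range(max_len)])              # initialize list with 0s to maximum seq length
--     elif seq_type == 'tag_ids':
--         padded_seq.extend([tag2idx[0] for i in range(max_len)])
--     if len(sequence) > max_len:
--         padded_seq[:] = sequence[:max_len]              # cut sequence longer than the maximum SEQ_LEN
--     else:
--         padded_seq[:len(sequence)] = sequence           # replace parts of default seq with values of original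
--     return padded_seq
-- ===== SOURCE B (Python) =====
-- def pad_seq_bi(sequence, tag2idx, max_len, seq_type='tok_ids'):
--     pad_value = {'tok_ids': lambda: 0, 'tag_ids': lambda: tag2idx[0]}
--     return [sequence[i] if i < len(sequence) else pad_value[seq_type]() for i in range(max_len)]
-- ===== Notes on version B (the rewrite author's own statement) =====
-- stated objective: alternative
-- what changed: B builds the output in one index-driven comprehension over range(max_len) (sequence[i] when the index is in range, else a pad value dispatched per slot from a dict of thunks keyed by seq_type), instead of A's preallocate-a-padding-buffer-then-overwrite-by-slice-assignment with a len>max_len branch; Pre_ excludes unrecognized seq_type with max_len > len(sequence), where B's dict dispatch raises KeyError while A's empty-buffer fall-through returns the raw unpadded sequence, and tag_ids inputs whose tag2idx lacks key 0 with max_len >= 1, where A raises KeyError.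
-- intended difference: For max_len < 0 with len(sequence) > -max_len, A returns sequence[:max_len] (trimming elements off the end, an artefact of Python's negative slicing), while B returns []: a non-positive target length yields an empty padded sequence, the intended reading of max_len as a length. — e.g. on pad_seq_bi([1, 2, 3], [], -1, "tok_ids"): A returns [1, 2], B returns []
-- outside the precondition, e.g. on pad_seq_bi([1, 2], {}, 4, 'other'): A returns [1, 2], B raises KeyError
import Mathlib
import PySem

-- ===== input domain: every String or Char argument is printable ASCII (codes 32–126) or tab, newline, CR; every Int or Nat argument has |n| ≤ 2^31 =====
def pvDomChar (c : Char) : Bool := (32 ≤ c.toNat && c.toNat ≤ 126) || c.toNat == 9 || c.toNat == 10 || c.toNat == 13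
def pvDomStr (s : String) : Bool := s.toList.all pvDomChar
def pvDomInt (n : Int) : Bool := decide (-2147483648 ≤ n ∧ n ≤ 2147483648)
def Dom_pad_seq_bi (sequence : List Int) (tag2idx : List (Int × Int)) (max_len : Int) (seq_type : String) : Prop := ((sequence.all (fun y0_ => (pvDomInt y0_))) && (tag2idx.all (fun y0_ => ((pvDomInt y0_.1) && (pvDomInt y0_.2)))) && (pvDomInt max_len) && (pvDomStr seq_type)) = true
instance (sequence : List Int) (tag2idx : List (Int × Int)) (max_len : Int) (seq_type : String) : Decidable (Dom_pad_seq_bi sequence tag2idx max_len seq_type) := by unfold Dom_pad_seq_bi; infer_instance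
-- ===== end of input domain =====

-- B builds the result by a single index-driven comprehension over range(max_len) instead of A's preallocated buffer overwritten by slice assignment (alternative decomposition, same cost).


-- ===== PORT A =====
def pad_seq_bi (sequence : List Int) (tag2idx : List (Int × Int)) (max_len : Int) (seq_type : String) : List Int :=
  let padded_seq : List Int := []
  let padded_seq : List Int :=
    if seq_type == "tok_ids" then
      padded_seq ++ (PySem.List.pyRange 0 max_len 1).map (fun _ => (0 : Int))
    else if seq_type == "tag_ids" then
      -- tag2idx[0] raises KeyError when key 0 is absent (and max_len ≥ 1); excluded by Pre_, so getD's default is unreachable there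
      padded_seq ++ (PySem.List.pyRange 0 max_len 1).map (fun _ => ((PySem.Dict.mk tag2idx).get? 0).getD 0)
    else padded_seq
  if (sequence.length : Int) > max_len then
    PySem.List.slice sequence none (some max_len)                                  -- padded_seq[:] = sequence[:max_len]
  else
    sequence ++ PySem.List.slice padded_seq (some (sequence.length : Int)) none    -- padded_seq[:len(sequence)] = sequence

-- ===== PORT B =====
def pad_seq_bi_alt (sequence : List Int) (tag2idx : List (Int × Int)) (max_len : Int) (seq_type : String) : List Int :=
  -- pad_value = {'tok_ids': λ: 0, 'tag_ids': λ: tag2idx[0]}: the lookup pad_value[seq_type] of this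
  -- two-literal dict is transcribed as the if-chain on the key; it raises KeyError for any other
  -- seq_type (reachable only when some index falls past the sequence, excluded by Pre_ — the final
  -- fallback thunk stands for that KeyError), and the 'tag_ids' thunk raises KeyError when key 0 is
  -- absent from tag2idx (also excluded by Pre_, so that getD default is unreachable too)
  (PySem.List.pyRange 0 max_len 1).map (fun i =>
    if i < (sequence.length : Int) then PySem.List.pyGetD sequence i 0
    else (if seq_type == "tok_ids" then (fun _ : Unit => (0 : Int))
          else if seq_type == "tag_ids" then (fun _ : Unit => ((PySem.Dict.mk tag2idx).get? 0).getD 0)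
          else (fun _ : Unit => 0)) ())

-- ===== PRECONDITION & SPEC =====
-- Pre_ excludes unrecognized seq_type with max_len > len(sequence), where B's dict dispatch raises
-- KeyError while A's empty-buffer fall-through returns the raw unpadded sequence, and 'tag_ids' inputs
-- whose tag2idx lacks key 0 with max_len ≥ 1, where A raises KeyError.
def Pre_pad_seq_bi (sequence : List Int) (tag2idx : List (Int × Int)) (max_len : Int) (seq_type : String) : Prop :=
  ¬ (¬ (seq_type = "tok_ids" ∨ seq_type = "tag_ids") ∧ (sequence.length : Int) < max_len) ∧
  ¬ (seq_type = "tag_ids" ∧ 1 ≤ max_len ∧ (PySem.Dict.mk tag2idx).contains 0 = false)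
instance (sequence : List Int) (tag2idx : List (Int × Int)) (max_len : Int) (seq_type : String) : Decidable (Pre_pad_seq_bi sequence tag2idx max_len seq_type) := by unfold Pre_pad_seq_bi; infer_instance
def pvWitness_pad_seq_bi : List Int × (List (Int × Int)) × Int × String := ([1, 2], [(0, 3)], 4, "tag_ids")

-- For max_len < 0 with len(sequence) > -max_len, A returns sequence[:max_len] (trimming elements off the
-- END, an artefact of Python's negative slicing), while B returns []: a non-positive target length yields
-- an empty padded sequence, the intended reading of max_len as a length.
def D_pad_seq_bi (sequence : List Int) (tag2idx : List (Int × Int)) (max_len : Int) (seq_type : String) : Prop :=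
  max_len < 0 ∧ 0 < (sequence.length : Int) + max_len
instance (sequence : List Int) (tag2idx : List (Int × Int)) (max_len : Int) (seq_type : String) : Decidable (D_pad_seq_bi sequence tag2idx max_len seq_type) := by unfold D_pad_seq_bi; infer_instance

def Spec_pad_seq_bi (sequence : List Int) (tag2idx : List (Int × Int)) (max_len : Int) (seq_type : String) (out : List Int) : Prop := ¬ D_pad_seq_bi sequence tag2idx max_len seq_type → out = pad_seq_bi_alt sequence tag2idx max_len seq_type
instance (sequence : List Int) (tag2idx : List (Int × Int)) (max_len : Int) (seq_type : String) (out : List Int) : Decidable (Spec_pad_seq_bi sequence tag2idx max_len seq_type out) := by unfold Spec_pad_seq_bi; infer_instance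

def pvDiffWitness_pad_seq_bi : List Int × (List (Int × Int)) × Int × String := ([1, 2, 3], [], -1, "tok_ids")
def pvDiffWitnessOut_pad_seq_bi : (List Int) × (List Int) := ([1, 2], [])

-- ===== CLAIM =====
def Claim_unchanged_pad_seq_bi : Prop := ∀ (sequence : List Int) (tag2idx : List (Int × Int)) (max_len : Int) (seq_type : String), Dom_pad_seq_bi sequence tag2idx max_len seq_type → Pre_pad_seq_bi sequence tag2idx max_len seq_type → Spec_pad_seq_bi sequence tag2idx max_len seq_type (pad_seq_bi sequence tag2idx max_len seq_type)
def Claim_changed_pad_seq_bi : Prop := Dom_pad_seq_bi (pvDiffWitness_pad_seq_bi.1) (pvDiffWitness_pad_seq_bi.2.1) (pvDiffWitness_pad_seq_bi.2.2.1) (pvDiffWitness_pad_seq_bi.2.2.2) ∧ Pre_pad_seq_bi (pvDiffWitness_pad_seq_bi.1) (pvDiffWitness_pad_seq_bi.2.1) (pvDiffWitness_pad_seq_bi.2.2.1) (pvDiffWitness_pad_seq_bi.2.2.2) ∧ D_pad_seq_bi (pvDiffWitness_pad_seq_bi.1) (pvDiffWitness_pad_seq_bi.2.1) (pvDiffWitness_pad_seq_bi.2.2.1)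 (pvDiffWitness_pad_seq_bi.2.2.2) ∧ pad_seq_bi (pvDiffWitness_pad_seq_bi.1) (pvDiffWitness_pad_seq_bi.2.1) (pvDiffWitness_pad_seq_bi.2.2.1) (pvDiffWitness_pad_seq_bi.2.2.2) = pvDiffWitnessOut_pad_seq_bi.1 ∧ pad_seq_bi_alt (pvDiffWitness_pad_seq_bi.1) (pvDiffWitness_pad_seq_bi.2.1) (pvDiffWitness_pad_seq_bi.2.2.1) (pvDiffWitness_pad_seq_bi.2.2.2) = pvDiffWitnessOut_pad_seq_bi.2 ∧ pvDiffWitnessOut_pad_seq_bi.1 ≠ pvDiffWitnessOut_pad_seq_bi.2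
def Claim_exact_pad_seq_bi : Prop := ∀ (sequence : List Int) (tag2idx : List (Int × Int)) (max_len : Int) (seq_type : String), Dom_pad_seq_bi sequence tag2idx max_len seq_type → Pre_pad_seq_bi sequence tag2idx max_len seq_type → D_pad_seq_bi sequence tag2idx max_len seq_type → pad_seq_bi sequence tag2idx max_len seq_type ≠ pad_seq_bi_alt sequence tag2idx max_len seq_type

-- ===== LEMMAS AND PROOFS =====

-- B's comprehension, over Nat range: picking xs[k] below length and c above equals take-then-pad
theorem map_range_pad (xs : List Int) (c : Int) (n : Nat) :
    (List.range n).map (fun (k : Nat) => if (k : Int) < (xs.length : Int) then xs.getD k 0 else c)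
      = xs.take n ++ List.replicate (n - xs.length) c := by
  induction n with
  | zero => simp
  | succ n ih =>
    rw [List.range_succ, List.map_append, ih, List.map_singleton]
    by_cases h : n < xs.length
    · have h0 : n + 1 - xs.length = 0 := by omega
      have h0' : n - xs.length = 0 := by omega
      have hi : ((n : Int) < (xs.length : Int)) := by exact_mod_cast h
      rw [h0, h0']
      simp only [List.replicate_zero, List.append_nil, if_pos hi]
      rw [List.take_succ]
      simp [List.getD, h]
    · have hi : ¬ ((n : Int) < (xs.length : Int)) := by push_neg; exact_mod_cast Nat.le_of_not_lt h
      have h1 : n + 1 - xs.length = (n - xs.length) + 1 := by omega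
      rw [if_neg hi, h1, List.replicate_succ',
        List.take_of_length_le (by omega), List.take_of_length_le (by omega)]
      simp

-- B equals take-then-pad once max_len ≥ 0 (c is whatever B's else-branch evaluates to)
theorem alt_eq_take_pad (sequence : List Int) (max_len : Int) (c : Int) :
    (PySem.List.pyRange 0 max_len 1).map
        (fun i => if i < (sequence.length : Int) then PySem.List.pyGetD sequence i 0 else c)
      = sequence.take max_len.toNat ++ List.replicate (max_len.toNat - sequence.length) c := by
  rw [PySem.List.pyRange_one, List.map_map]
  simp only [Int.sub_zero]
  have hc : ((fun i => if i < (sequence.length : Int) then PySem.List.pyGetD sequence i 0 else c)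
        ∘ (fun k : Nat => (0 : Int) + k))
      = (fun (k : Nat) => if (k : Int) < (sequence.length : Int) then sequence.getD k 0 else c) := by
    funext k
    simp [Function.comp, PySem.List.pyGetD_natCast]
  rw [hc, map_range_pad]

-- A equals take-then-pad with the same pad constant, for max_len ≥ 0 and a recognized seq_type
theorem a_eq_take_pad (sequence : List Int) (max_len : Int) (hm : 0 ≤ max_len) (c : Int) :
    (if (sequence.length : Int) > max_len then
        PySem.List.slice sequence none (some max_len)
      else sequence ++ PySem.List.slice ((PySem.List.pyRange 0 max_len 1).map (fun _ => c)) (some (sequence.length : Int)) none)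
      = sequence.take max_len.toNat ++ List.replicate (max_len.toNat - sequence.length) c := by
  have hrep : (PySem.List.pyRange 0 max_len 1).map (fun _ => c) = List.replicate max_len.toNat c := by
    rw [PySem.List.pyRange_one]
    simp [Function.comp_def, List.map_const']
  by_cases hgt : (sequence.length : Int) > max_len
  · rw [if_pos hgt, PySem.List.slice_to sequence hm]
    have h0 : max_len.toNat - sequence.length = 0 := by omega
    rw [h0]
    simp
  · push_neg at hgt
    rw [if_neg (by omega), hrep, PySem.List.slice_from_natCast, List.drop_replicate,
      List.take_of_length_le (by omega)]

-- A = B on Pre_ outside the negative-trim region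
theorem pad_seq_bi_eq_alt (sequence : List Int) (tag2idx : List (Int × Int)) (max_len : Int) (seq_type : String)
    (hun : ¬ (¬ (seq_type = "tok_ids" ∨ seq_type = "tag_ids") ∧ (sequence.length : Int) < max_len))
    (hnd : ¬ (max_len < 0 ∧ 0 < (sequence.length : Int) + max_len)) :
    pad_seq_bi sequence tag2idx max_len seq_type = pad_seq_bi_alt sequence tag2idx max_len seq_type := by
  by_cases hm : 0 ≤ max_len
  · by_cases hst : seq_type = "tok_ids" ∨ seq_type = "tag_ids"
    · rcases hst with h | h <;> subst h <;>
        simp only [pad_seq_bi, pad_seq_bi_alt, List.nil_append, beq_iff_eq,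
          if_true, if_false, String.reduceEq] <;>
        rw [alt_eq_take_pad sequence max_len, a_eq_take_pad sequence max_len hm]
    · -- unrecognized seq_type: Pre_ forces max_len ≤ len(sequence); A keeps an empty buffer,
      -- B's comprehension never reaches its else branch: both are sequence[:max_len]
      have hle : max_len ≤ (sequence.length : Int) := by
        by_contra hc
        exact hun ⟨hst, by omega⟩
      have h1 : ¬ (seq_type == "tok_ids") := by
        simp only [beq_iff_eq]; intro h; exact hst (Or.inl h)
      have h2 : ¬ (seq_type == "tag_ids") := by
        simp only [beq_iff_eq]; intro h; exact hst (Or.inr h)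
      have hB : pad_seq_bi_alt sequence tag2idx max_len seq_type
          = sequence.take max_len.toNat ++ List.replicate (max_len.toNat - sequence.length) 0 := by
        simp only [pad_seq_bi_alt, if_neg h1, if_neg h2]
        exact alt_eq_take_pad sequence max_len 0
      have hrep0 : max_len.toNat - sequence.length = 0 := by omega
      rw [hB, hrep0]
      simp only [List.replicate_zero, List.append_nil, pad_seq_bi, if_neg h1, if_neg h2]
      by_cases hgt : (sequence.length : Int) > max_len
      · rw [if_pos hgt]
        exact PySem.List.slice_to sequence hm
      · have hlen : (sequence.length : Int) = max_len := by omega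
        rw [if_neg hgt, PySem.List.slice_from_natCast]
        simp [List.take_of_length_le (by omega : sequence.length ≤ max_len.toNat)]
  · -- max_len < 0 and len(sequence) + max_len ≤ 0: both sides are []
    have hlen : (sequence.length : Int) + max_len ≤ 0 := by
      by_contra hc
      exact hnd ⟨by omega, by omega⟩
    have hr : PySem.List.pyRange 0 max_len 1 = [] :=
      PySem.List.pyRange_one_eq_nil (by omega)
    have hk : 0 < (-max_len).toNat := by omega
    have hml : max_len = -(((-max_len).toNat : Nat) : Int) := by omega
    have hsl : PySem.List.slice sequence none (some max_len) = [] := by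
      rw [hml, PySem.List.slice_to_neg_natCast sequence ((-max_len).toNat) hk]
      have h0 : sequence.length - (-max_len).toNat = 0 := by omega
      rw [h0]
      simp
    have hgt : (sequence.length : Int) > max_len := by omega
    simp [pad_seq_bi, pad_seq_bi_alt, hr, hsl, hgt]

-- inside D_: A's value has positive length, B's is []
theorem pad_seq_bi_ne_alt (sequence : List Int) (tag2idx : List (Int × Int)) (max_len : Int) (seq_type : String)
    (hd : max_len < 0) (hl : 0 < (sequence.length : Int) + max_len) :
    pad_seq_bi sequence tag2idx max_len seq_type ≠ pad_seq_bi_alt sequence tag2idx max_len seq_type := by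
  have hr : PySem.List.pyRange 0 max_len 1 = [] :=
    PySem.List.pyRange_one_eq_nil (by omega)
  have hk : 0 < (-max_len).toNat := by omega
  have hml : max_len = -(((-max_len).toNat : Nat) : Int) := by omega
  have hgt : (sequence.length : Int) > max_len := by omega
  have hA : pad_seq_bi sequence tag2idx max_len seq_type
      = sequence.take (sequence.length - (-max_len).toNat) := by
    simp only [pad_seq_bi, if_pos hgt]
    rw [hml, PySem.List.slice_to_neg_natCast sequence ((-max_len).toNat) hk]
    congr 1
    omega
  have hB : pad_seq_bi_alt sequence tag2idx max_len seq_type = [] := by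
    simp [pad_seq_bi_alt, hr]
  rw [hA, hB]
  intro hcontra
  have hlen0 : (sequence.take (sequence.length - (-max_len).toNat)).length = 0 := by
    rw [hcontra]; rfl
  rw [List.length_take] at hlen0
  omega

-- ===== VERDICT =====
theorem pad_seq_bi_spec : Claim_unchanged_pad_seq_bi := by
  intro sequence tag2idx max_len seq_type _ hpre hnd
  exact pad_seq_bi_eq_alt sequence tag2idx max_len seq_type hpre.1 hnd

theorem pad_seq_bi_changed : Claim_changed_pad_seq_bi := by
  unfold Claim_changed_pad_seq_bi; decide

theorem pad_seq_bi_tight : Claim_exact_pad_seq_bi := by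
  intro sequence tag2idx max_len seq_type _ _ hd
  exact pad_seq_bi_ne_alt sequence tag2idx max_len seq_type hd.1 hd.2
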